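-- pv_equiv track=rewrite | github.com/theJ2C3/OTREE_Gain_from_poker_trade | Gains_from_Trade/exchange/__init__.py | check_one_pairs
-- ===== SOURCE A (Python) =====
-- from collections import defaultdict
--
-- def check_one_pairs(hand):
--     values = [i[1] for i in hand]
--     value_counts = defaultdict(lambda:0)
--     for v in values:
--         value_counts[v]+=1
--     if 2 in value_counts.values():
--         return True
--     else:
--         return False
-- ===== SOURCE B (Python) =====
-- def check_one_pairs(hand):
--     vals = sorted(i[1] for i in hand)
--     while vals:
--         n = 1
--         while n < len(vals) and vals[n] == vals[0]:
--             n += 1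
--         if n == 2:
--             return True
--         vals = vals[n:]
--     return False
-- ===== Notes on version B (the rewrite author's own statement) =====
-- stated objective: alternative
-- what changed: Replaces hash-based counting (defaultdict then membership test on its values) with sort-then-scan: sort the card values and walk runs of equal consecutive values, returning True iff some run has length exactly 2.
import Mathlib
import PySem

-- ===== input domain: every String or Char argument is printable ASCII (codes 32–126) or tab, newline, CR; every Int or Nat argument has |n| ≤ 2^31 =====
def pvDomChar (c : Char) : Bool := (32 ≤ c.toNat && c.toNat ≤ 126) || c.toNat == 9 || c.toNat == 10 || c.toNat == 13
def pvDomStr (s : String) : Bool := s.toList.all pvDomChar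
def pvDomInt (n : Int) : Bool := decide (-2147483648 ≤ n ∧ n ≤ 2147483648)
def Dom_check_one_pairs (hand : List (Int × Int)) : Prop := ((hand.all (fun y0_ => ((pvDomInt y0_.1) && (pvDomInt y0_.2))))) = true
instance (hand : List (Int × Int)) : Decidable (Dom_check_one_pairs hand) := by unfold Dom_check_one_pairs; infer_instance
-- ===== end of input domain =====

-- B replaces A's hash-based counting with sort-then-scan over runs of equal values (alternative decomposition, not faster).

-- ===== PORT A =====
def check_one_pairs (hand : List (Int × Int)) : Bool :=
  let values := hand.map (fun i => i.2)
  let value_counts := values.foldl (fun d v => d.modify v 0 (· + 1)) PySem.Dict.empty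
  if (2 : Int) ∈ value_counts.values then true else false

-- ===== PORT B =====
-- the inner `while` counts the run of the head value (n = 1 + takeWhile length);
-- `vals = vals[n:]` drops exactly that run (dropWhile), since the run is the maximal
-- prefix of elements equal to the head — exact transcription of Source B's outer loop
def scanRuns (vals : List Int) : Bool :=
  match vals with
  | [] => false
  | x :: rest =>
    let n := 1 + (rest.takeWhile (fun y => y == x)).length
    if n = 2 then true
    else scanRuns (rest.dropWhile (fun y => y == x))
termination_by vals.length
decreasing_by
  simpa using Nat.lt_succ_of_le (rest.dropWhile_sublist (p := fun y => y == x)).length_le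

def check_one_pairs_alt (hand : List (Int × Int)) : Bool :=
  scanRuns (PySem.List.sorted (hand.map (fun i => i.2)) (fun x => x) false)

-- ===== PRECONDITION & SPEC =====
def Spec_check_one_pairs (hand : List (Int × Int)) (out : Bool) : Prop := out = check_one_pairs_alt hand
instance (hand : List (Int × Int)) (out : Bool) : Decidable (Spec_check_one_pairs hand out) := by unfold Spec_check_one_pairs; infer_instance

-- ===== CLAIM (what is proved, stated in full; the proofs are below) =====
def Claim_equal_check_one_pairs : Prop := ∀ (hand : List (Int × Int)), Dom_check_one_pairs hand → Spec_check_one_pairs hand (check_one_pairs hand)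

-- ===== LEMMAS AND PROOFS =====

-- A's result: some value occurs exactly twice among the second components
theorem check_one_pairs_iff (hand : List (Int × Int)) :
    check_one_pairs hand = true ↔
      ∃ v ∈ hand.map (fun i => i.2), (hand.map (fun i => i.2)).count v = 2 := by
  unfold check_one_pairs
  simp only [← PySem.Dict.counter_eq_foldl]
  simp [PySem.Dict.values, PySem.Dict.items_counter, PySem.Set.mem_ofList]
  constructor
  · rintro ⟨v, hv, h⟩; exact ⟨v, hv, by omega⟩
  · rintro ⟨v, hv, h⟩; exact ⟨v, hv, by omega⟩

theorem mem_take_eq (x : Int) (rest : List Int) :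
    ∀ y ∈ rest.takeWhile (fun y => y == x), y = x := by
  intro y hy
  simpa using List.mem_takeWhile_imp hy

theorem lt_of_mem_drop (x : Int) (rest : List Int)
    (h : List.Pairwise (fun a b => a ≤ b) (x :: rest)) :
    ∀ y ∈ rest.dropWhile (fun y => y == x), x < y := by
  intro y hy
  obtain ⟨hx, hp⟩ := List.pairwise_cons.1 h
  cases hr : rest.dropWhile (fun y => y == x) with
  | nil => simp [hr] at hy
  | cons h0 t =>
    have hne : rest.dropWhile (fun y => y == x) ≠ [] := by simp [hr]
    have hh0 := List.head_dropWhile_not (p := fun y => y == x) (l := rest) hne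
    simp [hr] at hh0
    have hxh0 : x < h0 := by
      have hm : h0 ∈ rest := (List.dropWhile_sublist _).subset (hr ▸ List.mem_cons_self)
      exact lt_of_le_of_ne (hx h0 hm) (Ne.symm hh0)
    have hpr : (h0 :: t).Pairwise (fun a b => a ≤ b) := by
      rw [← hr]; exact hp.sublist (List.dropWhile_sublist _)
    rw [hr] at hy
    rcases List.mem_cons.1 hy with rfl | hy
    · exact hxh0
    · exact lt_of_lt_of_le hxh0 ((List.pairwise_cons.1 hpr).1 y hy)

theorem count_split (x v : Int) (rest : List Int) :
    List.count v rest = List.count v (rest.takeWhile (fun y => y == x)) +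
      List.count v (rest.dropWhile (fun y => y == x)) := by
  conv_lhs => rw [← List.takeWhile_append_dropWhile (p := fun y => y == x) (l := rest)]
  rw [List.count_append]

-- B's run scan on a sorted list finds exactly the values of multiplicity 2
theorem scanRuns_iff (l : List Int) (h : l.Pairwise (fun a b => a ≤ b)) :
    scanRuns l = true ↔ ∃ v ∈ l, l.count v = 2 := by
  fun_induction scanRuns l with
  | case1 => simp
  | case2 x rest n hn =>
    simp only [true_iff]
    refine ⟨x, by simp, ?_⟩
    have hcx : List.count x (rest.takeWhile (fun y => y == x)) =
        (rest.takeWhile (fun y => y == x)).length :=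
      List.count_eq_length.2 (fun b hb => (mem_take_eq x rest b hb).symm)
    have hcd : List.count x (rest.dropWhile (fun y => y == x)) = 0 :=
      List.count_eq_zero.2 (fun hm => absurd (lt_of_mem_drop x rest h x hm) (lt_irrefl x))
    rw [List.count_cons_self, count_split x x rest, hcx, hcd]
    omega
  | case3 x rest n hn ih =>
    have hp : (rest.dropWhile (fun y => y == x)).Pairwise (fun a b => a ≤ b) :=
      ((List.pairwise_cons.1 h).2).sublist (List.dropWhile_sublist _)
    rw [ih hp]
    constructor
    · rintro ⟨v, hv, hc⟩
      have hvx : x < v := lt_of_mem_drop x rest h v hv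
      have hvt : List.count v (rest.takeWhile (fun y => y == x)) = 0 :=
        List.count_eq_zero.2 (fun hm => absurd (mem_take_eq x rest v hm) (by omega))
      refine ⟨v, List.mem_cons_of_mem _ ((List.dropWhile_sublist _).subset hv), ?_⟩
      rw [List.count_cons_of_ne (by omega), count_split x v rest, hvt, hc]
    · rintro ⟨v, hv, hc⟩
      by_cases hvx : v = x
      · subst hvx
        exfalso
        have hcx : List.count v (rest.takeWhile (fun y => y == v)) =
            (rest.takeWhile (fun y => y == v)).length :=
          List.count_eq_length.2 (fun b hb => (mem_take_eq v rest b hb).symm)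
        have hcd : List.count v (rest.dropWhile (fun y => y == v)) = 0 :=
          List.count_eq_zero.2 (fun hm => absurd (lt_of_mem_drop v rest h v hm) (lt_irrefl v))
        rw [List.count_cons_self, count_split v v rest, hcx, hcd] at hc
        omega
      · have hvr : v ∈ rest.dropWhile (fun y => y == x) := by
          rcases List.mem_cons.1 hv with rfl | hv
          · exact absurd rfl hvx
          · rw [← List.takeWhile_append_dropWhile (p := fun y => y == x) (l := rest)] at hv
            rcases List.mem_append.1 hv with hv | hv
            · exact absurd (mem_take_eq x rest v hv) hvx
            · exact hv
        have hvt : List.count v (rest.takeWhile (fun y => y == x)) = 0 :=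
          List.count_eq_zero.2 (fun hm => absurd (mem_take_eq x rest v hm) hvx)
        refine ⟨v, hvr, ?_⟩
        rw [List.count_cons_of_ne (by omega), count_split x v rest, hvt] at hc
        omega

theorem check_one_pairs_alt_iff (hand : List (Int × Int)) :
    check_one_pairs_alt hand = true ↔
      ∃ v ∈ hand.map (fun i => i.2), (hand.map (fun i => i.2)).count v = 2 := by
  unfold check_one_pairs_alt
  have hperm := PySem.List.sorted_perm (hand.map (fun i => i.2)) (fun x => x) false
  rw [scanRuns_iff _ (by simpa using PySem.List.sorted_pairwise (hand.map (fun i => i.2)) (fun x => x))]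
  constructor
  · rintro ⟨v, hv, hc⟩; exact ⟨v, hperm.mem_iff.1 hv, by rw [← hperm.count_eq]; exact hc⟩
  · rintro ⟨v, hv, hc⟩; exact ⟨v, hperm.mem_iff.2 hv, by rw [hperm.count_eq]; exact hc⟩

-- ===== VERDICT (by name: the statement is the Claim_ definition above) =====
theorem check_one_pairs_spec : Claim_equal_check_one_pairs := by
  intro hand _
  unfold Spec_check_one_pairs
  have := (check_one_pairs_iff hand).trans (check_one_pairs_alt_iff hand).symm
  exact Bool.eq_iff_iff.2 this
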